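-- pv_equiv track=rewrite | github.com/chython/chython | chython/algorithms/rings.py | _get_unique_chord
-- ===== SOURCE A (Python) =====
-- from typing import Any, Dict, List, Optional, Set, Tuple, TYPE_CHECKING, Union
--
-- def _get_unique_chord(ring: Tuple[int, ...], common: Set[int]) -> Optional[Tuple[int, ...]]:
--     lc = len(common)
--     if len(ring) == lc:
--         if common == set(ring):
--             return ()
--     else:
--         if common == set(ring[:lc]):
--             return *ring[lc - 1:], ring[0]
--         for _ in range(len(ring) - 1):
--             ring = (*ring[1:], ring[0])
--             if common == set(ring[:lc]):
--                 return *ring[lc - 1:], ring[0]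
-- ===== SOURCE B (Python) =====
-- def _get_unique_chord(ring, common):
--     lc = len(common)
--     n = len(ring)
--     if n == lc:
--         return () if common == set(ring) else None
--     if lc > n:
--         return None
--     # sliding-window membership/distinct counts over the cyclic ring, O(n)
--     cnt = {}
--     good = 0       # window positions whose value is in common
--     distinct = 0   # number of distinct values in the window
--     for j in range(lc):
--         v = ring[j]
--         p = cnt.get(v, 0)
--         cnt[v] = p + 1
--         if p == 0:
--             distinct += 1
--         if v in common:
--             good += 1
--     for k in range(n):
--         if good == lc and distinct == lc:
--             r = ring[k:] + ring[:k]
--             return (*r[lc - 1:], r[0])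
--         v = ring[k]
--         cnt[v] = cnt[v] - 1
--         if cnt[v] == 0:
--             distinct -= 1
--         if v in common:
--             good -= 1
--         w = ring[(k + lc) % n]
--         p = cnt.get(w, 0)
--         cnt[w] = p + 1
--         if p == 0:
--             distinct += 1
--         if w in common:
--             good += 1
--     return None
-- ===== Notes on version B (the rewrite author's own statement) =====
-- stated objective: faster
-- what changed: Instead of rebuilding the rotated tuple and re-computing set(ring[:lc]) for every rotation, B walks the ring once with a cyclic sliding window, keeping a count dict and incrementally updated 'members-in-common' and 'distinct-values' counters, and returns the chord at the first full match.
import Mathlib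
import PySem

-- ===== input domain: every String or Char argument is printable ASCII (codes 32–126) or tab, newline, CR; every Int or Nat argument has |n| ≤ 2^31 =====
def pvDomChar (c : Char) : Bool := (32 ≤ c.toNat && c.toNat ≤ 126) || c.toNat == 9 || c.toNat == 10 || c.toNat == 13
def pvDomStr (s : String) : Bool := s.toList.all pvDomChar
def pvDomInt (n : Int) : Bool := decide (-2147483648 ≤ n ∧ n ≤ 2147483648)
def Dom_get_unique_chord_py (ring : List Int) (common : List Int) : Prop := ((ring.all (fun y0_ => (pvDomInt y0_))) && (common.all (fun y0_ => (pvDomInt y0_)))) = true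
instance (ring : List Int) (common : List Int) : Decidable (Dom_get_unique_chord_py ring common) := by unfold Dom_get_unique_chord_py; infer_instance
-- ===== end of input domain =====

-- B replaces A's per-rotation set rebuild by one cyclic sliding window with incremental
-- membership/distinct counters (objective: faster, O(n+lc) vs O(n·lc)).

-- ===== PORT A =====
-- the for-loop: each iteration rotates the ring once and tests the lc-prefix as a set
def pvAuxA (c : List Int) (lc : Int) : Nat → List Int → Option (List Int)
  | 0, _ => none
  | Nat.succ k, ring =>
      let r := PySem.List.slice ring (some 1) none ++ [PySem.List.pyGetD ring 0 0]
      if PySem.Set.equal c (PySem.Set.ofList (PySem.List.slice r none (some lc))) then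
        some (PySem.List.slice r (some (lc - 1)) none ++ [PySem.List.pyGetD r 0 0])
      else pvAuxA c lc k r

def get_unique_chord_py (ring : List Int) (common : List Int) : Option (List Int) :=
  let c := PySem.Set.ofList common
  let lc : Int := (c.length : Int)
  if (ring.length : Int) = lc then
    if PySem.Set.equal c (PySem.Set.ofList ring) then some [] else none
  else
    if PySem.Set.equal c (PySem.Set.ofList (PySem.List.slice ring none (some lc))) then
      some (PySem.List.slice ring (some (lc - 1)) none ++ [PySem.List.pyGetD ring 0 0])
    else
      pvAuxA c lc (ring.length - 1) ring

-- ===== PORT B =====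
-- the main loop: test the counters, otherwise slide the window one step around the ring
def pvStepB (ring : List Int) (c : List Int) (lc n : Nat) :
    Nat → Nat → PySem.Dict Int Int × Int × Int → Option (List Int)
  | 0, _, _ => none
  | Nat.succ rem, k, st =>
      if st.2.1 = (lc : Int) ∧ st.2.2 = (lc : Int) then
        let r := PySem.List.slice ring (some (k : Int)) none ++
                 PySem.List.slice ring none (some (k : Int))
        some (PySem.List.slice r (some ((lc : Int) - 1)) none ++ [PySem.List.pyGetD r 0 0])
      else
        let v := PySem.List.pyGetD ring (k : Int) 0
        let cnt1 := st.1.insert v (st.1.getD v 0 - 1)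
        let distinct1 := if cnt1.getD v 0 = 0 then st.2.2 - 1 else st.2.2
        let good1 := if PySem.Set.contains c v then st.2.1 - 1 else st.2.1
        let w := PySem.List.pyGetD ring ((((k + lc) % n : Nat)) : Int) 0
        let p := cnt1.getD w 0
        let cnt2 := cnt1.insert w (p + 1)
        let distinct2 := if p = 0 then distinct1 + 1 else distinct1
        let good2 := if PySem.Set.contains c w then good1 + 1 else good1
        pvStepB ring c lc n rem (k + 1) (cnt2, good2, distinct2)

def get_unique_chord_py_alt (ring : List Int) (common : List Int) : Option (List Int) :=
  let c := PySem.Set.ofList common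
  let lc := c.length
  let n := ring.length
  if n = lc then
    if PySem.Set.equal c (PySem.Set.ofList ring) then some [] else none
  else if lc > n then none
  else
    let init := (List.range lc).foldl
      (fun (st : PySem.Dict Int Int × Int × Int) (j : Nat) =>
        let v := PySem.List.pyGetD ring (j : Int) 0
        let p := st.1.getD v 0
        (st.1.insert v (p + 1),
         (if PySem.Set.contains c v then st.2.1 + 1 else st.2.1),
         (if p = 0 then st.2.2 + 1 else st.2.2)))
      (PySem.Dict.empty, 0, 0)
    pvStepB ring c lc n n 0 init

-- ===== PRECONDITION & SPEC =====
def Spec_get_unique_chord_py (ring : List Int) (common : List Int) (out : Option (List Int)) : Prop := out = get_unique_chord_py_alt ring common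
instance (ring : List Int) (common : List Int) (out : Option (List Int)) : Decidable (Spec_get_unique_chord_py ring common out) := by unfold Spec_get_unique_chord_py; infer_instance

-- ===== CLAIM (what is proved, stated in full; the proofs are below) =====
def Claim_equal_get_unique_chord_py : Prop := ∀ (ring : List Int) (common : List Int), Dom_get_unique_chord_py ring common → Spec_get_unique_chord_py ring common (get_unique_chord_py ring common)


-- ===== LEMMAS AND PROOFS =====

-- rotation of the ring by k, its lc-window, the match condition and the returned chord
def pvRot (l : List Int) (k : Nat) : List Int := l.drop k ++ l.take k
def pvWin (l : List Int) (lc k : Nat) : List Int := (pvRot l k).take lc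
def pvCond (ring c : List Int) (lc k : Nat) : Bool :=
  PySem.Set.equal c (PySem.Set.ofList (pvWin ring lc k))
def pvChord (ring : List Int) (lc k : Nat) : List Int :=
  PySem.List.slice (pvRot ring k) (some ((lc : Int) - 1)) none ++
    [PySem.List.pyGetD (pvRot ring k) 0 0]
-- reference search: first of m consecutive rotations (from k) whose window matches, and its chord
def pvFind (ring c : List Int) (lc : Nat) : Nat → Nat → Option (List Int)
  | 0, _ => none
  | m + 1, k => if pvCond ring c lc k then some (pvChord ring lc k) else pvFind ring c lc m (k + 1)

-- loop invariant of B: the dict holds the window's counts, the two integers its two summaries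
def pvInv (ring c : List Int) (lc k : Nat) (st : PySem.Dict Int Int × Int × Int) : Prop :=
  (∀ v : Int, st.1.getD v 0 = ((pvWin ring lc k).count v : Int)) ∧
  st.2.1 = (((pvWin ring lc k).countP (fun v => PySem.Set.contains c v) : Nat) : Int) ∧
  st.2.2 = (((pvWin ring lc k).toFinset.card : Nat) : Int)

-- state of B's initialisation loop after m steps: counts/summaries of the m-prefix
def pvInvTake (ring c : List Int) (m : Nat) (st : PySem.Dict Int Int × Int × Int) : Prop :=
  (∀ v : Int, st.1.getD v 0 = ((ring.take m).count v : Int)) ∧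
  st.2.1 = (((ring.take m).countP (fun v => PySem.Set.contains c v) : Nat) : Int) ∧
  st.2.2 = (((ring.take m).toFinset.card : Nat) : Int)

lemma pvRot_zero (l : List Int) : pvRot l 0 = l := by simp [pvRot]

lemma pvRot_length (l : List Int) (k : Nat) : (pvRot l k).length = l.length := by
  simp [pvRot]; omega

lemma pvWin_zero (l : List Int) (lc : Nat) : pvWin l lc 0 = l.take lc := by
  rw [pvWin, pvRot_zero]

lemma pvWin_eq_map (l : List Int) (lc k : Nat) (hlc : lc ≤ l.length) (hk : k ≤ l.length) :
    pvWin l lc k = (List.range lc).map (fun j => l.getD ((k + j) % l.length) 0) := by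
  apply List.ext_getElem
  · simp [pvWin, pvRot_length l k]; omega
  · intro i h1 h2
    simp only [pvWin, List.getElem_take, List.getElem_map, List.getElem_range]
    have hi : i < l.length := by
      simp only [pvWin, List.length_take, pvRot_length l k] at h1
      omega
    rcases Nat.lt_or_ge (k + i) l.length with hcase | hcase
    · rw [Nat.mod_eq_of_lt hcase, List.getD_eq_getElem l 0 hcase]
      simp only [pvRot]
      rw [List.getElem_append_left (by simp; omega)]
      rw [List.getElem_drop]
    · have hmod : (k + i) % l.length = k + i - l.length := by
        rw [Nat.mod_eq_sub_mod hcase, Nat.mod_eq_of_lt (by omega)]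
      rw [hmod, List.getD_eq_getElem l 0 (by omega)]
      simp only [pvRot]
      rw [List.getElem_append_right (by simp; omega)]
      rw [List.getElem_take]
      congr 1
      simp only [List.length_drop]
      omega

lemma pvWin_length (l : List Int) (lc k : Nat) (hlc : lc ≤ l.length) (hk : k ≤ l.length) :
    (pvWin l lc k).length = lc := by
  rw [pvWin_eq_map l lc k hlc hk]; simp

lemma pvWin_cons (l : List Int) (lc k : Nat) (h1 : 1 ≤ lc) (hlc : lc ≤ l.length)
    (hk : k < l.length) :
    pvWin l lc k =
      l.getD k 0 :: (List.range (lc - 1)).map (fun j => l.getD ((k + 1 + j) % l.length) 0) := by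
  rw [pvWin_eq_map l lc k hlc (le_of_lt hk)]
  obtain ⟨lc', rfl⟩ : ∃ lc', lc = lc' + 1 := ⟨lc - 1, by omega⟩
  rw [List.range_succ_eq_map, List.map_cons, List.map_map]
  simp only [Nat.add_sub_cancel]
  congr 1
  · rw [Nat.add_zero, Nat.mod_eq_of_lt hk]
  · apply List.map_congr_left
    intro j hj
    simp only [Function.comp_apply, Nat.succ_eq_add_one]
    have hidx : k + (j + 1) = k + 1 + j := by omega
    rw [hidx]

lemma pvWin_succ (l : List Int) (lc k : Nat) (h1 : 1 ≤ lc) (hlc : lc ≤ l.length)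
    (hk : k < l.length) :
    pvWin l lc (k + 1) =
      (List.range (lc - 1)).map (fun j => l.getD ((k + 1 + j) % l.length) 0) ++
        [l.getD ((k + lc) % l.length) 0] := by
  rw [pvWin_eq_map l lc (k + 1) hlc (by omega)]
  obtain ⟨lc', rfl⟩ : ∃ lc', lc = lc' + 1 := ⟨lc - 1, by omega⟩
  rw [List.range_succ, List.map_append, List.map_cons, List.map_nil]
  simp only [Nat.add_sub_cancel]
  have hidx : k + 1 + lc' = k + (lc' + 1) := by omega
  rw [hidx]

-- a window matches as a set iff all its members lie in c and it has exactly |c| distinct values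
lemma pvCond_iff (ring c : List Int) (lc k : Nat) (hc : c.Nodup) (hlen : c.length = lc)
    (hw : (pvWin ring lc k).length = lc) :
    pvCond ring c lc k = true ↔
      ((pvWin ring lc k).countP (fun v => PySem.Set.contains c v) = lc ∧
        (pvWin ring lc k).toFinset.card = lc) := by
  set w := pvWin ring lc k with hwdef
  rw [pvCond, PySem.Set.equal_iff]
  constructor
  · intro h
    have hmem : ∀ x ∈ w, x ∈ c := by
      intro x hx
      exact (h x).mpr ((PySem.Set.mem_ofList w x).mpr hx)
    refine ⟨?_, ?_⟩
    · rw [← hw, List.countP_eq_length]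
      intro a ha
      exact (PySem.Set.contains_iff c a).mpr (hmem a ha)
    · have hfs : w.toFinset = c.toFinset := by
        ext x
        simp only [List.mem_toFinset]
        exact ⟨fun hx => hmem x hx, fun hx => (PySem.Set.mem_ofList w x).mp ((h x).mp hx)⟩
      rw [hfs, List.toFinset_card_of_nodup hc, hlen]
  · rintro ⟨hcnt, hcard⟩
    have hmem : ∀ x ∈ w, x ∈ c := by
      intro x hx
      have := List.countP_eq_length.mp (by rw [hcnt, hw]) x hx
      exact (PySem.Set.contains_iff c x).mp this
    have hsub : w.toFinset ⊆ c.toFinset := by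
      intro x hx
      simp only [List.mem_toFinset] at hx ⊢
      exact hmem x hx
    have hle : c.toFinset.card ≤ w.toFinset.card := by
      rw [List.toFinset_card_of_nodup hc, hlen, hcard]
    have heq : w.toFinset = c.toFinset := Finset.eq_of_subset_of_card_le hsub hle
    intro x
    constructor
    · intro hx
      have hx' : x ∈ w.toFinset := by rw [heq]; exact List.mem_toFinset.mpr hx
      exact (PySem.Set.mem_ofList w x).mpr (List.mem_toFinset.mp hx')
    · intro hx
      have hx' : x ∈ w.toFinset := List.mem_toFinset.mpr ((PySem.Set.mem_ofList w x).mp hx)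
      rw [heq] at hx'
      exact List.mem_toFinset.mp hx'

-- if the window is shorter than c, it can never match (used for lc > n and n = 0)
lemma pvCond_false_of_short (ring c : List Int) (lc k : Nat) (hc : c.Nodup)
    (hshort : (pvWin ring lc k).length < c.length) : pvCond ring c lc k = false := by
  cases hval : pvCond ring c lc k
  · rfl
  · exfalso
    rw [pvCond, PySem.Set.equal_iff] at hval
    have hsub : c.toFinset ⊆ (pvWin ring lc k).toFinset := by
      intro x hx
      simp only [List.mem_toFinset] at hx ⊢
      exact (PySem.Set.mem_ofList _ x).mp ((hval x).mp hx)
    have h1 : c.length ≤ (pvWin ring lc k).toFinset.card := by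
      rw [← List.toFinset_card_of_nodup hc]
      exact Finset.card_le_card hsub
    have h2 : (pvWin ring lc k).toFinset.card ≤ (pvWin ring lc k).length :=
      List.toFinset_card_le _
    omega

lemma pvFind_none (ring c : List Int) (lc : Nat)
    (h : ∀ k, pvCond ring c lc k = false) : ∀ m k, pvFind ring c lc m k = none := by
  intro m
  induction m with
  | zero => intro k; rfl
  | succ m ih => intro k; rw [pvFind, h k]; simp [ih]

-- one Python rotation step `(*ring[1:], ring[0])` advances pvRot by one
lemma pvStepA (l : List Int) (k : Nat) (hk : k < l.length) :
    PySem.List.slice (pvRot l k) (some 1) none ++ [PySem.List.pyGetD (pvRot l k) 0 0] =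
      pvRot l (k + 1) := by
  have hd : l.drop k = l[k] :: l.drop (k + 1) := List.drop_eq_getElem_cons hk
  have hrot : pvRot l k = l[k] :: (l.drop (k + 1) ++ l.take k) := by
    rw [pvRot, hd]; rfl
  rw [PySem.List.slice_from_one, hrot, PySem.List.pyGetD_zero_cons]
  have htake : l.take (k + 1) = l.take k ++ [l[k]] := by
    rw [List.take_succ, List.getElem?_eq_getElem hk]; rfl
  simp only [List.tail_cons, pvRot, htake]
  simp

-- A's loop starting from rotation k with m iterations left is the reference search from k+1
lemma pvAuxA_eq (ring c : List Int) (lc : Nat) :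
    ∀ (m k : Nat), k + m ≤ ring.length →
      pvAuxA c ((lc : Nat) : Int) m (pvRot ring k) = pvFind ring c lc m (k + 1) := by
  intro m
  induction m with
  | zero => intro k _; rfl
  | succ m ih =>
    intro k h
    have hk : k < ring.length := by omega
    rw [pvAuxA]
    simp only [pvStepA ring k hk]
    have hsl : PySem.List.slice (pvRot ring (k + 1)) none (some ((lc : Nat) : Int)) =
        pvWin ring lc (k + 1) := by
      rw [PySem.List.slice_to _ (by positivity)]
      simp [pvWin]
    rw [pvFind, hsl]
    by_cases hcond : pvCond ring c lc (k + 1) = true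
    · have hcondE : PySem.Set.equal c (PySem.Set.ofList (pvWin ring lc (k + 1))) = true := hcond
      rw [hcondE, if_pos hcond]
      rfl
    · have hcondE : PySem.Set.equal c (PySem.Set.ofList (pvWin ring lc (k + 1))) = false := by
        cases hval : pvCond ring c lc (k + 1)
        · exact hval
        · exact absurd hval hcond
      rw [hcondE, if_neg hcond]
      simp only [Bool.false_eq_true, if_false]
      exact ih (k + 1) (by omega)

-- B's initialisation loop establishes the invariant for the m-prefix
lemma pvInit_aux (ring c : List Int) (lc : Nat) (hlc : lc ≤ ring.length) :
    ∀ m, m ≤ lc →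
      pvInvTake ring c m
        ((List.range m).foldl
          (fun (st : PySem.Dict Int Int × Int × Int) (j : Nat) =>
            let v := PySem.List.pyGetD ring (j : Int) 0
            let p := st.1.getD v 0
            (st.1.insert v (p + 1),
             (if PySem.Set.contains c v then st.2.1 + 1 else st.2.1),
             (if p = 0 then st.2.2 + 1 else st.2.2)))
          (PySem.Dict.empty, 0, 0)) := by
  intro m
  induction m with
  | zero =>
    intro _
    refine ⟨fun v => by simp [PySem.Dict.getD_empty], by simp, by simp⟩
  | succ m ih =>
    intro hm
    obtain ⟨ih1, ih2, ih3⟩ := ih (by omega)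
    rw [List.range_succ, List.foldl_append, List.foldl_cons, List.foldl_nil]
    have hmn : m < ring.length := by omega
    have hv : PySem.List.pyGetD ring ((m : Nat) : Int) 0 = ring.getD m 0 :=
      PySem.List.pyGetD_natCast ring m 0
    have htake : ring.take (m + 1) = ring.take m ++ [ring.getD m 0] := by
      rw [List.take_succ, List.getElem?_eq_getElem hmn, List.getD_eq_getElem ring 0 hmn]
      rfl
    refine ⟨?_, ?_, ?_⟩
    · intro u
      simp only [hv, PySem.Dict.getD_insert]
      rw [htake]
      by_cases hu : u = ring.getD m 0
      · rw [if_pos hu, ih1 (ring.getD m 0), hu]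
        simp [List.count_append]
      · rw [if_neg hu, ih1 u]
        simp only [List.count_append]
        have : List.count u [ring.getD m 0] = 0 := by
          simp [List.count_singleton]
          exact fun h => hu h.symm
        omega
    · simp only [hv]
      rw [htake, List.countP_append]
      by_cases hcx : PySem.Set.contains c (ring.getD m 0) = true
      · have hm' : ring[m]?.getD 0 ∈ c := (PySem.Set.contains_iff c _).mp hcx
        rw [if_pos hcx, ih2]
        simp [List.countP_cons, hm']
      · have hm' : ring[m]?.getD 0 ∉ c := fun h => hcx ((PySem.Set.contains_iff c _).mpr h)
        rw [if_neg hcx, ih2]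
        simp [List.countP_cons, hm']
    · simp only [hv]
      rw [htake]
      have hcnt : ((List.range m).foldl
          (fun (st : PySem.Dict Int Int × Int × Int) (j : Nat) =>
            let v := PySem.List.pyGetD ring (j : Int) 0
            let p := st.1.getD v 0
            (st.1.insert v (p + 1),
             (if PySem.Set.contains c v then st.2.1 + 1 else st.2.1),
             (if p = 0 then st.2.2 + 1 else st.2.2)))
          (PySem.Dict.empty, 0, 0)).1.getD (ring.getD m 0) 0 =
          ((ring.take m).count (ring.getD m 0) : Int) := ih1 _
      by_cases hmem : ring.getD m 0 ∈ ring.take m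
      · have hne : (ring.take m).count (ring.getD m 0) ≠ 0 := by
          simpa [List.count_eq_zero] using hmem
        rw [if_neg (by rw [hcnt]; exact_mod_cast hne), ih3]
        congr 1
        rw [List.toFinset_append]
        simp only [List.toFinset_cons, List.toFinset_nil, insert_empty_eq]
        rw [Finset.union_comm, ← Finset.insert_eq]
        rw [Finset.insert_eq_self.mpr (List.mem_toFinset.mpr hmem)]
      · have hz : (ring.take m).count (ring.getD m 0) = 0 := List.count_eq_zero.mpr hmem
        rw [if_pos (by rw [hcnt, hz]; rfl), ih3]
        rw [List.toFinset_append]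
        simp only [List.toFinset_cons, List.toFinset_nil, insert_empty_eq]
        rw [Finset.union_comm, ← Finset.insert_eq]
        rw [Finset.card_insert_of_notMem (by simpa using hmem)]
        push_cast
        ring

-- B's main loop computes the reference search while maintaining the invariant
lemma pvStepB_eq (ring c : List Int) (lc : Nat) (hc : c.Nodup) (hlen : c.length = lc)
    (hlc : lc ≤ ring.length) :
    ∀ (m k : Nat) (st : PySem.Dict Int Int × Int × Int), k + m = ring.length →
      pvInv ring c lc k st →
      pvStepB ring c lc ring.length m k st = pvFind ring c lc m k := by
  intro m
  induction m with
  | zero => intro k st _ _; rfl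
  | succ m ih =>
    intro k st hkm hinv
    obtain ⟨h1, h2, h3⟩ := hinv
    have hk : k < ring.length := by omega
    have hw : (pvWin ring lc k).length = lc := pvWin_length ring lc k hlc (by omega)
    have hiff : (st.2.1 = ((lc : Nat) : Int) ∧ st.2.2 = ((lc : Nat) : Int)) ↔
        pvCond ring c lc k = true := by
      rw [h2, h3, pvCond_iff ring c lc k hc hlen hw]
      constructor
      · rintro ⟨a, b⟩; exact ⟨by exact_mod_cast a, by exact_mod_cast b⟩
      · rintro ⟨a, b⟩; exact ⟨by exact_mod_cast a, by exact_mod_cast b⟩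
    rw [pvStepB, pvFind]
    by_cases hcond : pvCond ring c lc k = true
    · rw [if_pos (hiff.mpr hcond), if_pos hcond]
      have hr : PySem.List.slice ring (some ((k : Nat) : Int)) none ++
          PySem.List.slice ring none (some ((k : Nat) : Int)) = pvRot ring k := by
        rw [PySem.List.slice_from ring (by positivity), PySem.List.slice_to ring (by positivity)]
        simp [pvRot]
      simp only [hr]
      rfl
    · rw [if_neg (fun h => hcond (hiff.mp h)), if_neg hcond]
      -- lc ≥ 1, else the empty window would always match
      have hlc1 : 1 ≤ lc := by
        rcases Nat.eq_zero_or_pos lc with h0 | hpos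
        · exfalso
          apply hcond
          rw [← hiff, h2, h3]
          have hwin : pvWin ring lc k = [] := by
            rw [h0, pvWin]; rfl
          rw [hwin, h0]
          simp
        · exact hpos
      set x := ring.getD k 0 with hx
      set R := (List.range (lc - 1)).map (fun j => ring.getD ((k + 1 + j) % ring.length) 0)
        with hR
      set w := ring.getD ((k + lc) % ring.length) 0 with hwv
      have hwc : pvWin ring lc k = x :: R := pvWin_cons ring lc k hlc1 hlc hk
      have hws : pvWin ring lc (k + 1) = R ++ [w] := pvWin_succ ring lc k hlc1 hlc hk
      have hvv : PySem.List.pyGetD ring ((k : Nat) : Int) 0 = x :=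
        PySem.List.pyGetD_natCast ring k 0
      have hww : PySem.List.pyGetD ring ((((k + lc) % ring.length : Nat)) : Int) 0 = w :=
        PySem.List.pyGetD_natCast ring _ 0
      simp only [hvv, hww]
      -- counts after removing the window head
      have hcnt1 : ∀ u : Int,
          (st.1.insert x (st.1.getD x 0 - 1)).getD u 0 = (R.count u : Int) := by
        intro u
        rw [PySem.Dict.getD_insert]
        by_cases hu : u = x
        · rw [if_pos hu, h1 x, hwc, hu]
          simp [List.count_cons]
        · rw [if_neg hu, h1 u, hwc]
          simp [List.count_cons, Ne.symm hu]
      have hgood1 : (if PySem.Set.contains c x = true then st.2.1 - 1 else st.2.1) =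
          ((R.countP (fun v => PySem.Set.contains c v) : Nat) : Int) := by
        rw [h2, hwc]
        by_cases hcx : PySem.Set.contains c x = true
        · have hm' : x ∈ c := (PySem.Set.contains_iff c x).mp hcx
          rw [if_pos hcx]
          simp [List.countP_cons, hm']
        · have hm' : x ∉ c := fun h => hcx ((PySem.Set.contains_iff c x).mpr h)
          rw [if_neg hcx]
          simp [List.countP_cons, hm']
      have hdist1 : (if (st.1.insert x (st.1.getD x 0 - 1)).getD x 0 = 0
            then st.2.2 - 1 else st.2.2) = ((R.toFinset.card : Nat) : Int) := by
        rw [hcnt1 x, h3, hwc]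
        by_cases hmem : x ∈ R
        · have hne : R.count x ≠ 0 := by simpa [List.count_eq_zero] using hmem
          rw [if_neg (by exact_mod_cast hne)]
          congr 1
          simp only [List.toFinset_cons]
          rw [Finset.insert_eq_self.mpr (List.mem_toFinset.mpr hmem)]
        · have hz : R.count x = 0 := List.count_eq_zero.mpr hmem
          rw [if_pos (by rw [hz]; rfl)]
          simp only [List.toFinset_cons]
          rw [Finset.card_insert_of_notMem (by simpa using hmem)]
          push_cast
          ring
      have hnext : pvInv ring c lc (k + 1)
          ((st.1.insert x (st.1.getD x 0 - 1)).insert w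
              ((st.1.insert x (st.1.getD x 0 - 1)).getD w 0 + 1),
           (if PySem.Set.contains c w = true then
              (if PySem.Set.contains c x = true then st.2.1 - 1 else st.2.1) + 1
            else (if PySem.Set.contains c x = true then st.2.1 - 1 else st.2.1)),
           (if (st.1.insert x (st.1.getD x 0 - 1)).getD w 0 = 0 then
              (if (st.1.insert x (st.1.getD x 0 - 1)).getD x 0 = 0 then st.2.2 - 1 else st.2.2) + 1
            else
              (if (st.1.insert x (st.1.getD x 0 - 1)).getD x 0 = 0 then st.2.2 - 1 else st.2.2))) := by
        refine ⟨?_, ?_, ?_⟩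
        · intro u
          show ((st.1.insert x (st.1.getD x 0 - 1)).insert w
              ((st.1.insert x (st.1.getD x 0 - 1)).getD w 0 + 1)).getD u 0 = _
          rw [PySem.Dict.getD_insert, hws]
          by_cases hu : u = w
          · rw [if_pos hu, hcnt1 w, hu]
            simp [List.count_append]
          · rw [if_neg hu, hcnt1 u]
            have : List.count u [w] = 0 := by
              simp [List.count_singleton]
              exact fun h => hu h.symm
            simp only [List.count_append, this]
            push_cast
            omega
        · show (if PySem.Set.contains c w = true then _ else _) = _
          rw [hws, List.countP_append, hgood1]
          by_cases hcw : PySem.Set.contains c w = true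
          · have hm' : w ∈ c := (PySem.Set.contains_iff c w).mp hcw
            rw [if_pos hcw]
            simp [List.countP_cons, hm']
          · have hm' : w ∉ c := fun h => hcw ((PySem.Set.contains_iff c w).mpr h)
            rw [if_neg hcw]
            simp [List.countP_cons, hm']
        · show (if (st.1.insert x (st.1.getD x 0 - 1)).getD w 0 = 0 then _ else _) = _
          rw [hcnt1 w, hdist1, hws]
          by_cases hmem : w ∈ R
          · have hne : R.count w ≠ 0 := by simpa [List.count_eq_zero] using hmem
            rw [if_neg (by exact_mod_cast hne)]
            congr 1
            rw [List.toFinset_append]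
            simp only [List.toFinset_cons, List.toFinset_nil, insert_empty_eq]
            rw [Finset.union_comm, ← Finset.insert_eq]
            rw [Finset.insert_eq_self.mpr (List.mem_toFinset.mpr hmem)]
          · have hz : R.count w = 0 := List.count_eq_zero.mpr hmem
            rw [if_pos (by rw [hz]; rfl)]
            rw [List.toFinset_append]
            simp only [List.toFinset_cons, List.toFinset_nil, insert_empty_eq]
            rw [Finset.union_comm, ← Finset.insert_eq]
            rw [Finset.card_insert_of_notMem (by simpa using hmem)]
            push_cast
            ring
      exact ih (k + 1) _ (by omega) hnext

-- A's whole body is the reference search over all n rotations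
lemma pvA_eq (ring common : List Int) :
    get_unique_chord_py ring common =
      (if ring.length = (PySem.Set.ofList common).length then
        (if PySem.Set.equal (PySem.Set.ofList common) (PySem.Set.ofList ring) = true then
          some [] else none)
      else
        pvFind ring (PySem.Set.ofList common) (PySem.Set.ofList common).length
          ring.length 0) := by
  simp only [get_unique_chord_py]
  set c := PySem.Set.ofList common with hcdef
  by_cases hn : ring.length = c.length
  · rw [if_pos (by exact_mod_cast hn), if_pos hn]
  · rw [if_neg (fun h => hn (by exact_mod_cast h)), if_neg hn]
    have hslice : PySem.List.slice ring none (some ((c.length : Nat) : Int)) =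
        pvWin ring c.length 0 := by
      rw [PySem.List.slice_to ring (by positivity), pvWin_zero]
      simp
    rw [hslice]
    rcases Nat.eq_zero_or_pos ring.length with h0 | hpos
    · have hlc0 : c.length ≠ 0 := fun h => hn (by omega)
      have hcond : pvCond ring c c.length 0 = false := by
        apply pvCond_false_of_short ring c c.length 0 (PySem.Set.nodup_ofList common)
        have hwl : (pvWin ring c.length 0).length = 0 := by
          rw [pvWin_zero]; simp [h0]
        omega
      have hcondE : PySem.Set.equal c (PySem.Set.ofList (pvWin ring c.length 0)) = false := hcond
      rw [hcondE]
      have hm1 : ring.length - 1 = 0 := by omega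
      rw [hm1, h0]
      simp [pvAuxA, pvFind]
    · obtain ⟨n', hn'⟩ : ∃ n', ring.length = n' + 1 := ⟨ring.length - 1, by omega⟩
      have haux : pvAuxA c ((c.length : Nat) : Int) (ring.length - 1) ring =
          pvFind ring c c.length (ring.length - 1) 1 := by
        have h := pvAuxA_eq ring c c.length (ring.length - 1) 0 (by omega)
        rw [pvRot_zero] at h
        exact h
      rw [haux, hn']
      rw [pvFind]
      simp only [Nat.add_sub_cancel]
      by_cases hcond : pvCond ring c c.length 0 = true
      · have hcondE : PySem.Set.equal c (PySem.Set.ofList (pvWin ring c.length 0)) = true := hcond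
        rw [hcondE, if_pos hcond]
        simp only [if_true]
        simp [pvChord, pvRot_zero]
      · have hcondE : PySem.Set.equal c (PySem.Set.ofList (pvWin ring c.length 0)) = false := by
          cases hval : pvCond ring c c.length 0
          · exact hval
          · exact absurd hval hcond
        rw [hcondE, if_neg hcond]
        simp

-- B's whole body is the same reference search
lemma pvB_eq (ring common : List Int) :
    get_unique_chord_py_alt ring common =
      (if ring.length = (PySem.Set.ofList common).length then
        (if PySem.Set.equal (PySem.Set.ofList common) (PySem.Set.ofList ring) = true then
          some [] else none)
      else
        pvFind ring (PySem.Set.ofList common) (PySem.Set.ofList common).length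
          ring.length 0) := by
  simp only [get_unique_chord_py_alt]
  set c := PySem.Set.ofList common with hcdef
  have hc : c.Nodup := PySem.Set.nodup_ofList common
  by_cases hn : ring.length = c.length
  · rw [if_pos hn, if_pos hn]
  · rw [if_neg hn, if_neg hn]
    by_cases hgt : c.length > ring.length
    · rw [if_pos hgt]
      have hall : ∀ k, pvCond ring c c.length k = false := by
        intro k
        apply pvCond_false_of_short ring c c.length k hc
        have hwl : (pvWin ring c.length k).length ≤ ring.length := by
          have := pvRot_length ring k
          rw [pvWin]
          simp [this]
        omega
      exact (pvFind_none ring c c.length hall ring.length 0).symm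
    · rw [if_neg hgt]
      have hlc : c.length ≤ ring.length := by omega
      obtain ⟨i1, i2, i3⟩ := pvInit_aux ring c c.length hlc c.length le_rfl
      apply pvStepB_eq ring c c.length hc rfl hlc ring.length 0 _ (by omega)
      refine ⟨?_, ?_, ?_⟩
      · intro v
        rw [pvWin_zero]
        exact i1 v
      · rw [pvWin_zero]
        exact i2
      · rw [pvWin_zero]
        exact i3

-- ===== VERDICT (by name: the statement is the Claim_ definition above) =====
theorem get_unique_chord_py_spec : Claim_equal_get_unique_chord_py := by
  intro ring common _
  show get_unique_chord_py ring common = get_unique_chord_py_alt ring common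
  rw [pvA_eq, pvB_eq]
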